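-- pv_equiv track=rewrite | github.com/deleyva/app-martina | scripts/extract_pdf_book.py | dedup_consecutive_lines
-- ===== SOURCE A (Python) =====
-- def dedup_consecutive_lines(text: str) -> str:
--     """Remove consecutive duplicate lines from extracted PDF text.
--
--     Many PDFs (especially those produced by certain layout engines) yield
--     every line twice when extracted with PyMuPDF. This function drops a
--     line if it's identical to the immediately preceding line.
--     """
--     lines = text.split("\n")
--     deduped: list[str] = []
--     prev = None
--     for line in lines:
--         if line == prev:
--             continue
--         deduped.append(line)
--         prev = line
--     return "\n".join(deduped)
-- ===== SOURCE B (Python) =====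
-- from itertools import zip_longest
--
--
-- def dedup_consecutive_lines(text: str) -> str:
--     """Remove consecutive duplicate lines from extracted PDF text.
--
--     Stateless staged version: pair each line with its successor via
--     zip_longest and keep a line exactly when it differs from the line
--     after it (i.e. keep the last line of every run of equal lines; the
--     kept string is identical to the run's first line, so the result is
--     the same). No previous-line state is carried across the iteration.
--     """
--     lines = text.split("\n")
--     return "\n".join(a for a, b in zip_longest(lines, lines[1:]) if a != b)
-- ===== Notes on version B (the rewrite author's own statement) =====
-- stated objective: alternative
-- what changed: Instead of a stateful loop comparing each line to the previously kept line (keeping the first of each run), B zips the line list with its own one-step shift and statelessly filters the pairs, keeping a line exactly when it differs from its successor (the last of each run, an equal string).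
import Mathlib
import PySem

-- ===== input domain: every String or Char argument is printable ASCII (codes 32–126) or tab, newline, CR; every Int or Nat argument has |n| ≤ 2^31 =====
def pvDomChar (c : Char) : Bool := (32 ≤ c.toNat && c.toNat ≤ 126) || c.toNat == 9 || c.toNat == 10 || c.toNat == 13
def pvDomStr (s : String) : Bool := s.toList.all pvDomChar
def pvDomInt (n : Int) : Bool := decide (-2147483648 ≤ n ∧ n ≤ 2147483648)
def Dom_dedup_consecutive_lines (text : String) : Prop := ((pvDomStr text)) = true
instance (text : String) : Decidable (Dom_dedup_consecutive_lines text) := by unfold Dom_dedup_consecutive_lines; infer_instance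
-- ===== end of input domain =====

-- B replaces A's stateful prev-tracking loop (keep the first of each run) by a stateless
-- staged pipeline: zip the lines with their one-step shift and keep a line iff it differs
-- from its successor (the last of each run, an equal string); same return value.

-- ===== PORT A =====
-- the for-loop over `lines` with state (deduped, prev)
def pvLoopA : List String → List String → Option String → List String
  | [], deduped, _ => deduped
  | line :: rest, deduped, prev =>
    if some line = prev then pvLoopA rest deduped prev
    else pvLoopA rest (deduped ++ [line]) (some line)

def dedup_consecutive_lines (text : String) : String :=
  let lines := (PySem.Str.split? text "\n").getD []
  PySem.Str.join "\n" (pvLoopA lines [] none)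

-- ===== PORT B =====
-- zip_longest(lines, lines[1:]): pair each line with its successor (none past the end)
def pvZipL : List String → List String → List (String × Option String)
  | [], [] => []
  | [], y :: ys => ("", some y) :: pvZipL [] ys   -- unreachable in B (second list is shorter)
  | x :: xs, [] => (x, none) :: pvZipL xs []
  | x :: xs, y :: ys => (x, some y) :: pvZipL xs ys

def dedup_consecutive_lines_alt (text : String) : String :=
  let lines := (PySem.Str.split? text "\n").getD []
  PySem.Str.join "\n"
    (((pvZipL lines (lines.drop 1)).filter (fun p => p.2 ≠ some p.1)).map Prod.fst)

-- ===== PRECONDITION & SPEC =====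
def Spec_dedup_consecutive_lines (text : String) (out : String) : Prop := out = dedup_consecutive_lines_alt text
instance (text : String) (out : String) : Decidable (Spec_dedup_consecutive_lines text out) := by unfold Spec_dedup_consecutive_lines; infer_instance

-- ===== CLAIM (what is proved, stated in full; the proofs are below) =====
def Claim_equal_dedup_consecutive_lines : Prop := ∀ (text : String), Dom_dedup_consecutive_lines text → Spec_dedup_consecutive_lines text (dedup_consecutive_lines text)

-- ===== LEMMAS AND PROOFS =====

-- A's loop keeps comparing to prev and appending; factor out the suffix it still produces
def pvTail : Option String → List String → List String
  | _, [] => []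
  | prev, l :: ls =>
    if some l = prev then pvTail prev ls else l :: pvTail (some l) ls

theorem pvLoopA_eq_append (ls : List String) :
    ∀ (acc : List String) (prev : Option String),
    pvLoopA ls acc prev = acc ++ pvTail prev ls := by
  induction ls with
  | nil => intro acc prev; simp [pvLoopA, pvTail]
  | cons l ls ih =>
    intro acc prev
    by_cases h : some l = prev <;> simp [pvLoopA, pvTail, h, ih]

-- B's pipeline on a list, as one function
def pvB (ls : List String) : List String :=
  ((pvZipL ls (ls.drop 1)).filter (fun p => p.2 ≠ some p.1)).map Prod.fst

theorem pvB_cons (ls : List String) :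
    ∀ x, pvB (x :: ls) = x :: pvTail (some x) ls := by
  induction ls with
  | nil => intro x; simp [pvB, pvZipL, pvTail]
  | cons y rest ih =>
    intro x
    by_cases h : x = y
    · subst h
      have := ih x
      simp [pvB, pvZipL, pvTail, List.filter, List.drop] at this ⊢
      simpa using this
    · have h' : ¬ (some y = some x) := by simpa [eq_comm] using h
      have := ih y
      simp [pvB, pvZipL, pvTail, List.filter, List.drop, h'] at this ⊢
      simpa using this

theorem pvTail_none_eq (ls : List String) : pvTail none ls = pvB ls := by
  cases ls with
  | nil => simp [pvTail, pvB, pvZipL]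
  | cons l ls => simp [pvTail, pvB_cons]

-- ===== VERDICT (by name: the statement is the Claim_ definition above) =====
theorem dedup_consecutive_lines_spec : Claim_equal_dedup_consecutive_lines := by
  intro text _
  unfold Spec_dedup_consecutive_lines dedup_consecutive_lines dedup_consecutive_lines_alt
  simp [pvLoopA_eq_append, pvTail_none_eq, pvB]
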